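-- pv_equiv track=rewrite | github.com/iht627123067-art/meupainel | prompts/ambientedeteste/scripts/analisar_palantir.py | gerar_timeline
-- ===== SOURCE A (Python) =====
-- def gerar_timeline(conteudos):
--     """Gera dados para linha do tempo"""
--     por_data = {}
--
--     for item in conteudos:
--         data = item.get("email_date", "")
--         if data:
--             data_str = data[:10]  # YYYY-MM-DD
--             por_data[data_str] = por_data.get(data_str, 0) + 1
--
--     return dict(sorted(por_data.items()))
-- ===== SOURCE B (Python) =====
-- def gerar_timeline(conteudos):
--     """Gera dados para linha do tempo"""
--     datas = sorted(item.get("email_date", "")[:10]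
--                    for item in conteudos if item.get("email_date", ""))
--     timeline = {}
--     i = 0
--     n = len(datas)
--     while i < n:
--         j = i + 1
--         while j < n and datas[j] == datas[i]:
--             j += 1
--         timeline[datas[i]] = j - i
--         i = j
--     return timeline
-- ===== Notes on version B (the rewrite author's own statement) =====
-- stated objective: alternative
-- what changed: Instead of hashing dates into a dict counter and sorting the items afterwards, B collects the truthy date prefixes into a list, sorts that list, and counts adjacent equal runs in one scan to emit the dict already in sorted key order.
import Mathlib
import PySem

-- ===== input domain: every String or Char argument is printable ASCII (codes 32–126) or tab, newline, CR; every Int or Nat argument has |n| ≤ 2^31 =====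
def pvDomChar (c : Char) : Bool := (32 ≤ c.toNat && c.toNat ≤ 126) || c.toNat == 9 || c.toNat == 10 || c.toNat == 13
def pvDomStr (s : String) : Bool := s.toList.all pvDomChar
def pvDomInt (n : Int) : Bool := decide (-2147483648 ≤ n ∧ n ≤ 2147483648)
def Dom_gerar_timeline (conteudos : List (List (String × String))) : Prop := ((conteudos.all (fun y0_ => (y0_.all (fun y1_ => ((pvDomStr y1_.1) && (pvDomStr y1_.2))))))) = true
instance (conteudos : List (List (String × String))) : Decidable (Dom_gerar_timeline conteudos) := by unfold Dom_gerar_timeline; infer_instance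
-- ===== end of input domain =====

-- B replaces A's hash-counter-then-sort by sort-the-date-list-then-count-adjacent-runs (alternative algorithm, same results).

-- ===== PORT A =====
-- per-item loop body: data = item.get("email_date", ""); if data: por_data[data[:10]] += 1
def gerar_timeline (conteudos : List (List (String × String))) : List (String × Int) :=
  let por_data := conteudos.foldl (fun d item =>
    let data := (PySem.Dict.mk item).getD "email_date" ""
    if data ≠ "" then
      let data_str := PySem.Str.slice data none (some 10)
      d.insert data_str (d.getD data_str 0 + 1)
    else d) PySem.Dict.empty
  PySem.List.sorted2 por_data.items (fun p => p.1) (fun p => p.2)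

-- ===== PORT B =====
-- inner while: j advances past the run of datas[i]; returns (extra run length, suffix after the run)
def pvRun (x : String) : List String → Nat × List String
  | [] => (0, [])
  | y :: ys => if y = x then ((pvRun x ys).1 + 1, (pvRun x ys).2) else (0, y :: ys)

theorem pvRun_snd_length (x : String) (l : List String) : (pvRun x l).2.length ≤ l.length := by
  induction l with
  | nil => simp [pvRun]
  | cons y ys ih =>
    by_cases h : y = x
    · simp [pvRun, h]; omega
    · simp [pvRun, h]

-- outer while: one step per run, emitting (datas[i], j - i)
def pvGroup : List String → List (String × Int)
  | [] => []
  | x :: xs =>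
    (x, ((pvRun x xs).1 : Int) + 1) :: pvGroup (pvRun x xs).2
termination_by l => l.length
decreasing_by
  have := pvRun_snd_length x xs
  simp; omega

def gerar_timeline_alt (conteudos : List (List (String × String))) : List (String × Int) :=
  let datas := PySem.List.sorted (conteudos.filterMap (fun item =>
      let data := (PySem.Dict.mk item).getD "email_date" ""
      if data = "" then none else some (PySem.Str.slice data none (some 10)))) (fun x => x)
  pvGroup datas

-- ===== PRECONDITION & SPEC =====
def Spec_gerar_timeline (conteudos : List (List (String × String))) (out : List (String × Int)) : Prop := out = gerar_timeline_alt conteudos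
instance (conteudos : List (List (String × String))) (out : List (String × Int)) : Decidable (Spec_gerar_timeline conteudos out) := by unfold Spec_gerar_timeline; infer_instance

-- ===== CLAIM (what is proved, stated in full; the proofs are below) =====
def Claim_equal_gerar_timeline : Prop := ∀ (conteudos : List (List (String × String))), Dom_gerar_timeline conteudos → Spec_gerar_timeline conteudos (gerar_timeline conteudos)

-- ===== LEMMAS AND PROOFS =====

theorem pv_insertBy_congr {α : Type} (b₁ b₂ : α → α → Bool) (x : α) (l : List α)
    (h : ∀ y ∈ l, b₁ x y = b₂ x y) :
    PySem.List.insertBy b₁ x l = PySem.List.insertBy b₂ x l := by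
  induction l with
  | nil => rfl
  | cons y ys ih =>
    simp only [PySem.List.insertBy, h y (List.mem_cons_self)]
    split
    · rfl
    · rw [ih (fun z hz => h z (List.mem_cons_of_mem _ hz))]

theorem pv_foldl_insertBy_congr {α : Type} (b₁ b₂ : α → α → Bool) (S : List α) :
    ∀ (xs acc : List α), (∀ x ∈ xs, x ∈ S) → (∀ y ∈ acc, y ∈ S) →
    (∀ a ∈ S, ∀ b ∈ S, b₁ a b = b₂ a b) →
    xs.foldl (fun acc x => PySem.List.insertBy b₁ x acc) acc
      = xs.foldl (fun acc x => PySem.List.insertBy b₂ x acc) acc := by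
  intro xs
  induction xs with
  | nil => intro acc _ _ _; rfl
  | cons x xs ih =>
    intro acc hxs hacc hS
    have hxS : x ∈ S := hxs x (List.mem_cons_self)
    simp only [List.foldl_cons]
    rw [pv_insertBy_congr b₁ b₂ x acc (fun y hy => hS x hxS y (hacc y hy))]
    exact ih _ (fun z hz => hxs z (List.mem_cons_of_mem _ hz))
      (fun y hy => by
        rcases (PySem.List.mem_insertBy _ _ _ _).1 hy with h | h
        · exact h ▸ hxS
        · exact hacc y h) hS

-- sorted2 = sorted when the primary key separates the list's elements
theorem pv_sorted2_eq_sorted {α κ₁ κ₂ : Type} [LinearOrder κ₁] [LinearOrder κ₂]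
    (xs : List α) (k1 : α → κ₁) (k2 : α → κ₂)
    (hinj : ∀ a ∈ xs, ∀ b ∈ xs, k1 a = k1 b → a = b) :
    PySem.List.sorted2 xs k1 k2 = PySem.List.sorted xs k1 := by
  simp only [PySem.List.sorted2, PySem.List.sorted, if_neg (by decide : ¬ (false = true))]
  exact pv_foldl_insertBy_congr _ _ xs xs [] (fun _ h => h) (by simp) (by
    intro a ha b hb
    rcases lt_trichotomy (k1 a) (k1 b) with h | h | h
    · simp [h, not_lt_of_gt h]
    · have : a = b := hinj a ha b hb h
      subst this
      simp
    · simp [h, not_lt_of_gt h])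

theorem pv_ofList_sublist {α : Type} [BEq α] (l : List α) :
    ∃ t : List α, PySem.Set.ofList l = t ∧ t.Sublist l := by
  suffices h : ∀ (l acc : List α), ∃ t, List.foldl PySem.Set.add acc l = acc ++ t ∧ t.Sublist l by
    obtain ⟨t, ht, hs⟩ := h l PySem.Set.empty
    exact ⟨t, by simpa [PySem.Set.ofList, PySem.Set.empty] using ht, hs⟩
  intro l
  induction l with
  | nil => exact fun acc => ⟨[], by simp⟩
  | cons x xs ih =>
    intro acc
    by_cases hc : acc.contains x
    · obtain ⟨t, ht, hs⟩ := ih acc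
      exact ⟨t, by simpa [PySem.Set.add, hc] using ht, hs.cons x⟩
    · obtain ⟨t, ht, hs⟩ := ih (acc ++ [x])
      exact ⟨x :: t, by simpa [PySem.Set.add, hc] using ht, hs.cons₂ x⟩

theorem pv_ofList_pairwise_lt {α : Type} [BEq α] [LawfulBEq α] [LinearOrder α]
    (l : List α) (hp : l.Pairwise (· ≤ ·)) :
    (PySem.Set.ofList l).Pairwise (· < ·) := by
  obtain ⟨t, ht, hs⟩ := pv_ofList_sublist l
  have hle : (PySem.Set.ofList l).Pairwise (· ≤ ·) := ht ▸ hp.sublist hs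
  have hne : (PySem.Set.ofList l).Pairwise (· ≠ ·) := PySem.Set.nodup_ofList l
  exact (hle.and hne).imp (fun h => lt_of_le_of_ne h.1 h.2)

-- first occurrences of sorted(l) = sorted(set(l))
theorem pv_ofList_sorted_eq {α : Type} [BEq α] [LawfulBEq α] [LinearOrder α] (l : List α) :
    PySem.List.sorted (PySem.Set.ofList l) (fun x => x)
      = PySem.Set.ofList (PySem.List.sorted l (fun x => x)) := by
  apply PySem.List.sorted_eq_of_perm_of_pairwise_lt
  · exact (List.perm_ext_iff_of_nodup (PySem.Set.nodup_ofList _) (PySem.Set.nodup_ofList _)).2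
      (fun a => by simp [PySem.Set.mem_ofList, PySem.List.mem_sorted])
  · exact pv_ofList_pairwise_lt _ (PySem.List.sorted_pairwise l (fun x => x))

theorem pv_ofList_cons_cons_self {α : Type} [BEq α] [LawfulBEq α] (x : α) (t : List α) :
    PySem.Set.ofList (x :: x :: t) = PySem.Set.ofList (x :: t) := by
  simp [PySem.Set.ofList, PySem.Set.add, PySem.Set.empty]

theorem pv_ofList_cons_replicate {α : Type} [BEq α] [LawfulBEq α] (x : α) (n : Nat)
    (rest : List α) (h : x ∉ rest) :
    PySem.Set.ofList (x :: (List.replicate n x ++ rest)) = x :: PySem.Set.ofList rest := by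
  induction n with
  | zero =>
    rw [List.replicate_zero, List.nil_append, PySem.Set.ofList_cons]
    congr 1
    have hnm : x ∉ PySem.Set.ofList rest := fun hm => h ((PySem.Set.mem_ofList rest x).1 hm)
    -- discard of an absent element is the identity
    generalize PySem.Set.ofList rest = s at hnm ⊢
    induction s with
    | nil => rfl
    | cons y ys ih =>
      have hyx : ¬ (y == x) = true := by
        simp only [beq_iff_eq]
        intro he; exact hnm (he ▸ List.mem_cons_self)
      simp only [PySem.Set.discard, List.filter_cons]
      rw [if_pos (by simp [hyx])]
      have := ih (fun hm => hnm (List.mem_cons_of_mem _ hm))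
      simpa [PySem.Set.discard] using this
  | succ n ih =>
    rw [List.replicate_succ, List.cons_append, pv_ofList_cons_cons_self, ih]

theorem pvRun_spec (x : String) :
    ∀ (xs : List String), (∀ a ∈ xs, x ≤ a) → xs.Pairwise (· ≤ ·) →
    ∃ n rest, pvRun x xs = (n, rest) ∧ xs = List.replicate n x ++ rest ∧ x ∉ rest := by
  intro xs
  induction xs with
  | nil => exact fun _ _ => ⟨0, [], rfl, rfl, by simp⟩
  | cons y ys ih =>
    intro hle hp
    by_cases h : y = x
    · subst h
      obtain ⟨n, rest, h1, h2, h3⟩ :=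
        ih (fun a ha => hle a (List.mem_cons_of_mem _ ha)) hp.tail
      exact ⟨n + 1, rest, by simp [pvRun, h1], by simp [List.replicate_succ, ← h2], h3⟩
    · refine ⟨0, y :: ys, by simp [pvRun, h], by simp, ?_⟩
      intro hm
      rcases List.mem_cons.1 hm with he | hm'
      · exact h he.symm
      · have h1 : x ≤ y := hle y List.mem_cons_self
        have h2 : y ≤ x := (List.pairwise_cons.1 hp).1 x hm'
        exact h (le_antisymm h2 h1)

theorem pvGroup_spec : ∀ (s : List String), s.Pairwise (· ≤ ·) →
    pvGroup s = (PySem.Set.ofList s).map (fun k => (k, (s.count k : Int))) := by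
  intro s
  induction s using pvGroup.induct with
  | case1 => intro _; simp [pvGroup, PySem.Set.ofList, PySem.Set.empty]
  | case2 x xs ih =>
    intro hp
    obtain ⟨n, rest, h1, h2, h3⟩ :=
      pvRun_spec x xs (fun a ha => (List.pairwise_cons.1 hp).1 a ha) hp.tail
    have hrest : rest.Sublist xs := h2 ▸ (List.sublist_append_right _ _)
    have hrp : rest.Pairwise (· ≤ ·) := hp.tail.sublist hrest
    have ih' := ih (by rw [h1]; exact hrp)
    rw [pvGroup, ih', h1]
    dsimp only
    rw [show x :: xs = x :: (List.replicate n x ++ rest) from by rw [← h2],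
        pv_ofList_cons_replicate x n rest h3, List.map_cons]
    have hcx : (x :: (List.replicate n x ++ rest)).count x = n + 1 := by
      simp [List.count_append, List.count_eq_zero.2 h3]
    congr 1
    · rw [hcx]; push_cast; ring_nf
    · apply List.map_congr_left
      intro k hk
      have hkr : k ∈ rest := (PySem.Set.mem_ofList rest k).1 hk
      have hkx : ¬ (x == k) = true := by
        simp only [beq_iff_eq]; intro he; exact h3 (he ▸ hkr)
      simp [List.count_cons, List.count_append, List.count_replicate, hkx]

-- the date-prefix list A's loop effectively counts
theorem pv_foldA_eq_counter (conteudos : List (List (String × String))) :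
    conteudos.foldl (fun d item =>
      let data := (PySem.Dict.mk item).getD "email_date" ""
      if data ≠ "" then
        let data_str := PySem.Str.slice data none (some 10)
        d.insert data_str (d.getD data_str 0 + 1)
      else d) PySem.Dict.empty
      = PySem.Dict.counter (conteudos.filterMap (fun item =>
          let data := (PySem.Dict.mk item).getD "email_date" ""
          if data = "" then none else some (PySem.Str.slice data none (some 10)))) := by
  rw [← PySem.Dict.foldl_insert_getD_add_one_eq_counter, List.foldl_filterMap]
  congr 1
  funext d item
  by_cases h : (PySem.Dict.mk item).getD "email_date" "" = "" <;> simp [h]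

-- ===== VERDICT (by name: the statement is the Claim_ definition above) =====
theorem gerar_timeline_spec : Claim_equal_gerar_timeline := by
  intro conteudos _
  show gerar_timeline conteudos = gerar_timeline_alt conteudos
  simp only [gerar_timeline, gerar_timeline_alt]
  rw [pv_foldA_eq_counter, PySem.Dict.items_counter]
  set ds := conteudos.filterMap (fun item =>
      let data := (PySem.Dict.mk item).getD "email_date" ""
      if data = "" then none else some (PySem.Str.slice data none (some 10))) with hds
  have hinj : ∀ a ∈ (PySem.Set.ofList ds).map (fun k => (k, (ds.count k : Int))),
      ∀ b ∈ (PySem.Set.ofList ds).map (fun k => (k, (ds.count k : Int))),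
      a.1 = b.1 → a = b := by
    intro a ha b hb he
    obtain ⟨ka, _, rfl⟩ := List.mem_map.1 ha
    obtain ⟨kb, _, rfl⟩ := List.mem_map.1 hb
    simp only at he
    rw [he]
  rw [pv_sorted2_eq_sorted _ _ _ hinj]
  rw [pvGroup_spec _ (PySem.List.sorted_pairwise ds (fun x => x))]
  rw [← pv_ofList_sorted_eq]
  simp only [(PySem.List.sorted_perm ds (fun x => x) false).count_eq]
  apply PySem.List.sorted_eq_of_perm_of_pairwise_lt
  · exact (PySem.List.sorted_perm (PySem.Set.ofList ds) (fun x => x) false).map _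
  · exact List.pairwise_map.2 (PySem.List.sorted_ofList_pairwise_lt ds)
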